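-- pv_equiv track=rewrite | github.com/juanmc2005/SimilarityLearning | sts-stats2.py | partition_dups
-- ===== SOURCE A (Python) =====
-- def partition_dups(xs):
--     seen = set()
--     unique, dups = [], []
--     for x in xs:
--         if x not in seen:
--             seen.add(x)
--             unique.append(x)
--         elif x not in dups:
--             dups.append(x)
--     return [s for s in unique if s not in dups], dups
-- ===== SOURCE B (Python) =====
-- def partition_dups(xs):
--     # One pass to build a frequency table, then direct partition passes:
--     # uniques are exactly the count-1 elements (in order), dups are the
--     # values reaching their second occurrence (in second-occurrence order).
--     counts = {}
--     for x in xs: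
--         counts[x] = counts.get(x, 0) + 1
--     unique = [x for x in xs if counts[x] == 1]
--     dups, seen = [], {}
--     for x in xs:
--         seen[x] = seen.get(x, 0) + 1
--         if seen[x] == 2:
--             dups.append(x)
--     return unique, dups
-- ===== Notes on version B (the rewrite author's own statement) =====
-- stated objective: faster
-- what changed: Replaces A's incremental first-seen discovery with list-membership scans ('x not in dups' and the final 'unique minus dups' filter, both O(len(dups)) per element) by a precomputed frequency dict: uniques are read off as the count==1 elements and dups are emitted at each value's second occurrence, all via O(1) dict lookups.
import Mathlib
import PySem

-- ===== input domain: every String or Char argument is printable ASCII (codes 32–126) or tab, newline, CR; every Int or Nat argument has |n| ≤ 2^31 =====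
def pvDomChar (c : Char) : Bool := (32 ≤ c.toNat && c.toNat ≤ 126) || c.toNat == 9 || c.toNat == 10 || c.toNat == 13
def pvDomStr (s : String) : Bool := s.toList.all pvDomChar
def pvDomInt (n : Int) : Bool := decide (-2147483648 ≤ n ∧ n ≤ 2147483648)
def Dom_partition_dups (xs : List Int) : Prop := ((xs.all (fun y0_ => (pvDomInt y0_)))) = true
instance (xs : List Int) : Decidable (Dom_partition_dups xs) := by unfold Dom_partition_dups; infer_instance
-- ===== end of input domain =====

-- B replaces A's incremental first-seen/membership-scan discovery by a precomputed
-- frequency table: uniques are the count-1 elements, dups are emitted at each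
-- value's second occurrence; measured faster on large duplicate-heavy inputs.


-- ===== PORT A =====
def partition_dups (xs : List Int) : List Int × List Int :=
  let st := xs.foldl
    (fun (s : PySem.Set Int × List Int × List Int) x =>
      if ¬ (PySem.Set.contains s.1 x) then (PySem.Set.add s.1 x, s.2.1 ++ [x], s.2.2)
      else if ¬ (s.2.2.contains x) then (s.1, s.2.1, s.2.2 ++ [x])
      else s)
    (PySem.Set.empty, [], [])
  (st.2.1.filter (fun s => !(st.2.2.contains s)), st.2.2)

-- ===== PORT B =====
def partition_dups_alt (xs : List Int) : List Int × List Int :=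
  let counts := xs.foldl (fun (d : PySem.Dict Int Int) x => d.insert x (d.getD x 0 + 1)) PySem.Dict.empty
  let unique := xs.filter (fun x => counts.getD x 0 == 1)
  let st := xs.foldl
    (fun (s : PySem.Dict Int Int × List Int) x =>
      let seen := s.1.insert x (s.1.getD x 0 + 1)
      if seen.getD x 0 == 2 then (seen, s.2 ++ [x]) else (seen, s.2))
    (PySem.Dict.empty, [])
  (unique, st.2)

-- ===== PRECONDITION & SPEC =====
def Spec_partition_dups (xs : List Int) (out : List Int × List Int) : Prop := out = partition_dups_alt xs
instance (xs : List Int) (out : List Int × List Int) : Decidable (Spec_partition_dups xs out) := by unfold Spec_partition_dups; infer_instance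

-- ===== CLAIM (what is proved, stated in full; the proofs are below) =====
def Claim_equal_partition_dups : Prop := ∀ (xs : List Int), Dom_partition_dups xs → Spec_partition_dups xs (partition_dups xs)

-- ===== LEMMAS AND PROOFS =====

-- first occurrences of elements not in `seen`, in order
def pvFo (seen : List Int) : List Int → List Int
  | [] => []
  | x :: xs => if x ∈ seen then pvFo seen xs else x :: pvFo (x :: seen) xs

-- second occurrences (counting a prior multiset `pre`), in order
def pvDs (pre : List Int) : List Int → List Int
  | [] => []
  | x :: xs => if pre.count x = 1 then x :: pvDs (x :: pre) xs else pvDs (x :: pre) xs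

lemma pvFo_append (xs : List Int) : ∀ (seen : List Int) (x : Int),
    pvFo seen (xs ++ [x]) = pvFo seen xs ++ (if x ∈ seen ∨ x ∈ xs then [] else [x]) := by
  induction xs with
  | nil => intro seen x; by_cases h : x ∈ seen <;> simp [pvFo, h]
  | cons y ys ih =>
    intro seen x
    by_cases hy : y ∈ seen
    · simp only [List.cons_append, pvFo, hy, if_pos, ih]
      by_cases hx : x ∈ seen
      · simp [hx]
      · by_cases hxy : x = y
        · subst hxy; exact absurd hy hx
        · simp [hx, hxy]
    · simp only [List.cons_append, pvFo, hy, if_neg, ih, not_false_iff]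
      by_cases hx : x ∈ y :: seen
      · rcases List.mem_cons.mp hx with h | h
        · subst h; simp [List.mem_cons]
        · simp [h, List.mem_cons]
      · have hxs : x ∉ seen := fun h => hx (List.mem_cons_of_mem _ h)
        have hxy : x ≠ y := fun h => hx (h ▸ List.mem_cons_self)
        simp [hx, hxs, hxy, List.mem_cons]

lemma pvDs_append (xs : List Int) : ∀ (pre : List Int) (x : Int),
    pvDs pre (xs ++ [x]) = pvDs pre xs ++ (if pre.count x + xs.count x = 1 then [x] else []) := by
  induction xs with
  | nil => intro pre x; by_cases h : pre.count x = 1 <;> simp [pvDs, h]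
  | cons y ys ih =>
    intro pre x
    simp only [List.cons_append, pvDs, ih]
    have hcnt : (y :: pre).count x + ys.count x = pre.count x + (y :: ys).count x := by
      by_cases h : x = y <;> simp [List.count_cons, h] <;> omega
    by_cases hy : pre.count y = 1 <;> simp [hy, hcnt]

lemma pvMem_ds (xs : List Int) : ∀ (pre : List Int) (y : Int),
    y ∈ pvDs pre xs ↔ pre.count y ≤ 1 ∧ 2 ≤ pre.count y + xs.count y := by
  induction xs with
  | nil => intro pre y; simp [pvDs]
  | cons x xs ih =>
    intro pre y
    by_cases hx : pre.count x = 1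
    · simp only [pvDs, hx, if_pos, List.mem_cons, ih]
      by_cases hxy : y = x
      · subst hxy; simp; omega
      · simp [hxy, Ne.symm hxy]
    · simp only [pvDs, hx, if_neg, ih, not_false_iff]
      by_cases hxy : y = x
      · subst hxy; simp; omega
      · simp [Ne.symm hxy]

lemma pvFo_filter (xs : List Int) : ∀ (seen : List Int) (q : Int → Bool),
    (∀ y ∈ xs, q y = true → xs.count y ≤ 1) →
    (pvFo seen xs).filter q = xs.filter (fun y => !(seen.contains y) && q y) := by
  induction xs with
  | nil => intro seen q _; simp [pvFo]
  | cons x xs ih =>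
    intro seen q hq
    have hq' : ∀ y ∈ xs, q y = true → xs.count y ≤ 1 := by
      intro y hy hqy
      have := hq y (List.mem_cons_of_mem _ hy) hqy
      simp [List.count_cons] at this ⊢; omega
    by_cases hs : x ∈ seen
    · rw [pvFo, if_pos hs, ih seen q hq', List.filter_cons]
      simp [List.contains_eq_mem, hs]
    · rw [pvFo, if_neg hs, List.filter_cons, List.filter_cons, ih (x :: seen) q hq']
      by_cases hqx : q x = true
      · have hxxs : x ∉ xs := by
          have := hq x (List.mem_cons_self) hqx
          simp at this
          intro hmem
          have := List.count_pos_iff.mpr hmem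
          omega
        have : xs.filter (fun y => !((x :: seen).contains y) && q y)
             = xs.filter (fun y => !(seen.contains y) && q y) := by
          apply List.filter_congr
          intro y hy
          have hyx : y ≠ x := fun h => hxxs (h ▸ hy)
          simp [List.contains_eq_mem, hyx]
        rw [this]
        simp [hqx, List.contains_eq_mem, hs]
      · have hqx' : q x = false := by simpa using hqx
        have : xs.filter (fun y => !((x :: seen).contains y) && q y)
             = xs.filter (fun y => !(seen.contains y) && q y) := by
          apply List.filter_congr
          intro y hy
          by_cases hyx : y = x
          · subst hyx; simp [hqx']
          · simp [List.contains_eq_mem, hyx]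
        rw [this]
        simp [hqx', List.contains_eq_mem]

-- characterization of A's loop state
lemma pvA_state (xs : List Int) :
    xs.foldl
      (fun (s : PySem.Set Int × List Int × List Int) x =>
        if ¬ (PySem.Set.contains s.1 x) then (PySem.Set.add s.1 x, s.2.1 ++ [x], s.2.2)
        else if ¬ (s.2.2.contains x) then (s.1, s.2.1, s.2.2 ++ [x])
        else s)
      (PySem.Set.empty, [], [])
    = (PySem.Set.ofList xs, pvFo [] xs, pvDs [] xs) := by
  induction xs using List.reverseRecOn with
  | nil => rfl
  | append_singleton xs x ih =>
    rw [List.foldl_append, ih]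
    simp only [List.foldl_cons, List.foldl_nil]
    by_cases hmem : x ∈ xs
    · have hc : PySem.Set.contains (PySem.Set.ofList xs) x = true := by
        rw [PySem.Set.contains_iff]; exact (PySem.Set.mem_ofList xs x).mpr hmem
      rw [if_neg (by simpa using hmem)]
      by_cases hd : x ∈ pvDs [] xs
      · have : (pvDs [] xs).contains x = true := by simp [List.contains_eq_mem, hd]
        rw [if_neg (by simpa using hd)]
        have h2 : 2 ≤ xs.count x := by
          have := (pvMem_ds xs [] x).mp hd; simpa using this.2
        rw [PySem.Set.ofList_append_singleton, PySem.Set.add_of_mem ((PySem.Set.mem_ofList xs x).mpr hmem),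
            pvFo_append, pvDs_append]
        simp [hmem, List.count_nil]
        omega
      · have : (pvDs [] xs).contains x = false := by simp [List.contains_eq_mem, hd]
        rw [if_pos (by simpa using hd)]
        have h2 : ¬ 2 ≤ xs.count x := by
          intro h; exact hd ((pvMem_ds xs [] x).mpr (by simpa using h))
        have h1 : xs.count x = 1 := by
          have := List.count_pos_iff.mpr hmem; omega
        rw [PySem.Set.ofList_append_singleton, PySem.Set.add_of_mem ((PySem.Set.mem_ofList xs x).mpr hmem),
            pvFo_append, pvDs_append]
        simp [hmem, List.count_nil, h1]
    · have hc : PySem.Set.contains (PySem.Set.ofList xs) x = false := by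
        rw [← Bool.not_eq_true, PySem.Set.contains_iff]
        simp [PySem.Set.mem_ofList, hmem]
      rw [if_pos (by simpa using hmem)]
      have h0 : xs.count x = 0 := List.count_eq_zero.mpr hmem
      rw [PySem.Set.ofList_append_singleton, PySem.Set.add_of_not_mem (fun h => hmem ((PySem.Set.mem_ofList xs x).mp h)),
          pvFo_append, pvDs_append]
      simp [hmem, List.count_nil, h0]

-- characterization of B's second loop state
lemma pvB_state (xs : List Int) :
    xs.foldl
      (fun (s : PySem.Dict Int Int × List Int) x =>
        let seen := s.1.insert x (s.1.getD x 0 + 1)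
        if seen.getD x 0 == 2 then (seen, s.2 ++ [x]) else (seen, s.2))
      (PySem.Dict.empty, [])
    = (xs.foldl (fun (d : PySem.Dict Int Int) x => d.insert x (d.getD x 0 + 1)) PySem.Dict.empty,
       pvDs [] xs) := by
  induction xs using List.reverseRecOn with
  | nil => rfl
  | append_singleton xs x ih =>
    rw [List.foldl_append, List.foldl_append, ih]
    simp only [List.foldl_cons, List.foldl_nil]
    have hget : (xs.foldl (fun (d : PySem.Dict Int Int) x => d.insert x (d.getD x 0 + 1))
        PySem.Dict.empty).getD x 0 = (xs.count x : Int) := by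
      rw [PySem.Dict.getD_foldl_insert_add_one]
      simp [PySem.Dict.getD_empty]
    rw [pvDs_append]
    simp only [PySem.Dict.getD_insert_self, hget, List.count_nil, Nat.zero_add]
    by_cases h1 : xs.count x = 1
    · rw [if_pos (by simp [h1]), if_pos h1]
    · rw [if_neg (by simp; omega), if_neg h1]
      simp

-- ===== VERDICT (by name: the statement is the Claim_ definition above) =====
theorem partition_dups_spec : Claim_equal_partition_dups := by
  intro xs _
  unfold Spec_partition_dups partition_dups partition_dups_alt
  rw [pvA_state, pvB_state]
  simp only
  refine Prod.ext ?_ rfl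
  · -- unique components
    have hcounts : ∀ y, (xs.foldl (fun (d : PySem.Dict Int Int) x => d.insert x (d.getD x 0 + 1))
        PySem.Dict.empty).getD y 0 = (xs.count y : Int) := by
      intro y; rw [PySem.Dict.getD_foldl_insert_add_one]; simp [PySem.Dict.getD_empty]
    have hpred : (fun s => !((pvDs [] xs).contains s)) = (fun y => decide (xs.count y ≤ 1)) := by
      funext y
      have : (pvDs [] xs).contains y = decide (2 ≤ xs.count y) := by
        simp [List.contains_eq_mem, pvMem_ds]
      rw [this]
      by_cases h : 2 ≤ xs.count y
      · simp [h]; omega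
      · simp [h]; omega
    rw [hpred, pvFo_filter xs [] _ (by intro y _ hq; simpa using hq)]
    apply List.filter_congr
    intro y hy
    have hpos : 0 < xs.count y := List.count_pos_iff.mpr hy
    rw [hcounts y]
    simp only [List.contains_eq_mem, List.not_mem_nil, decide_false, Bool.not_false, Bool.true_and]
    by_cases h : xs.count y = 1
    · simp [h]
    · have : ¬ xs.count y ≤ 1 := by omega
      simp [this]
      omega
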